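-- pv_equiv track=rewrite | github.com/mmh132/ProjectEuler | work/P171.py | sumperms
-- ===== SOURCE A (Python) =====
-- from math import gcd
-- from math import factorial as fac
--
-- def sumperms(thing):
--     if len(thing) == 0: return 0
--     if len(thing) == 1: return thing[0]
--     thing = sorted(thing)
--     absnum = [1]
--     numref = [thing[0]]
--     uniquenums = 1
--     for i in range(len(thing)-1):
--         if thing[i] == thing[i+1]: absnum[-1]+=1
--         else: absnum.append(1); uniquenums+=1; numref.append(thing[i+1])
--     perms = fac(sum(absnum))
--     for i in range(len(absnum)):
--         perms = perms//fac(absnum[i])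
--     rv = 0
--     onedigit = 0
--     div = gcd(*absnum)
--     for i in range(len(absnum)):
--         absnum[i] = absnum[i]//div
--     perms = perms // sum(absnum)
--     for i in range(len(absnum)):
--         absnum[i]*=perms
--     for i in range(len(numref)):
--         onedigit += numref[i]*(absnum[i])
--     for i in range(len(thing)):
--         rv+=onedigit*(10**i)
--     return rv
-- ===== SOURCE B (Python) =====
-- from math import factorial as fac
-- from collections import Counter
--
-- def sumperms(thing):
--     n = len(thing)
--     if n == 0:
--         return 0
--     perms = fac(n)
--     for c in Counter(thing).values():
--         perms //= fac(c)
--     return (perms * sum(thing) // n) * ((10 ** n - 1) // 9)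
-- ===== Notes on version B (the rewrite author's own statement) =====
-- stated objective: simpler
-- what changed: B drops A's sort + adjacent-run-length scan, gcd normalization of the multiplicities and the 10**i accumulation loop, computing the same value as a Counter-based multinomial coefficient combined with the closed forms perms*sum(thing)//n and the repunit (10**n-1)//9.
import Mathlib
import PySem

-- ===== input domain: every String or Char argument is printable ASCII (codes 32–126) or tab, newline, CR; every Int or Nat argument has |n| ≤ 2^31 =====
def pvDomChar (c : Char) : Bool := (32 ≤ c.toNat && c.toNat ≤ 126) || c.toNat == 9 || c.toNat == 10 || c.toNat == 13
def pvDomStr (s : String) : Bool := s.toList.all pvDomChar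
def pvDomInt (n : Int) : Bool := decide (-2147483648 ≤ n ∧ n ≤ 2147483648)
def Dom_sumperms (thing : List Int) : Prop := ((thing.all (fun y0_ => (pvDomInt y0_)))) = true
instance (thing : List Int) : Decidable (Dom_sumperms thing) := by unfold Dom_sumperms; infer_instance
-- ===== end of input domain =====

-- B replaces A's sort + run-length scan + gcd normalization + powers-of-ten accumulation by a
-- Counter multinomial with the closed forms perms*sum//n and (10^n-1)//9 (objective: simpler).

-- ===== PORT A =====
-- math.factorial (its argument is always a nonnegative int in both programs)
def pvFac (n : Int) : Int := (Nat.factorial n.toNat : Int)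

def sumperms (thing : List Int) : Int :=
  if thing.length = 0 then 0
  else if thing.length = 1 then PySem.List.pyGetD thing 0 0
  else
    let t := PySem.List.sorted thing (fun x => x) false
    let st := (PySem.List.pyRange 0 ((t.length : Int) - 1) 1).foldl
      (fun (st : List Int × List Int × Int) i =>
        if PySem.List.pyGetD t i 0 = PySem.List.pyGetD t (i + 1) 0 then
          (PySem.List.pySetD st.1 (-1) (PySem.List.pyGetD st.1 (-1) 0 + 1), st.2.1, st.2.2)
        else
          (st.1 ++ [1], st.2.1 ++ [PySem.List.pyGetD t (i + 1) 0], st.2.2 + 1))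
      ([1], [PySem.List.pyGetD t 0 0], 1)
    let absnum := st.1
    let numref := st.2.1
    let perms := pvFac absnum.sum
    let perms := (PySem.List.pyRange 0 (absnum.length : Int) 1).foldl
      (fun p i => PySem.Int.floordiv p (pvFac (PySem.List.pyGetD absnum i 0))) perms
    let div : Int := absnum.foldl (fun g x => (Int.gcd g x : Int)) 0
    let absnum2 := (PySem.List.pyRange 0 (absnum.length : Int) 1).foldl
      (fun a i => PySem.List.pySetD a i (PySem.Int.floordiv (PySem.List.pyGetD a i 0) div)) absnum
    let perms2 := PySem.Int.floordiv perms absnum2.sum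
    let absnum3 := (PySem.List.pyRange 0 (absnum2.length : Int) 1).foldl
      (fun a i => PySem.List.pySetD a i (PySem.List.pyGetD a i 0 * perms2)) absnum2
    let onedigit := (PySem.List.pyRange 0 (numref.length : Int) 1).foldl
      (fun od i => od + PySem.List.pyGetD numref i 0 * PySem.List.pyGetD absnum3 i 0) 0
    (PySem.List.pyRange 0 (t.length : Int) 1).foldl
      (fun rv i => rv + onedigit * (10 : Int) ^ i.toNat) 0

-- ===== PORT B =====
def sumperms_alt (thing : List Int) : Int :=
  let n := thing.length
  if n = 0 then 0
  else
    let perms := ((PySem.Dict.counter thing).values).foldl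
      (fun p c => PySem.Int.floordiv p (pvFac c)) (pvFac (n : Int))
    PySem.Int.floordiv (perms * thing.sum) (n : Int) *
      PySem.Int.floordiv ((10 : Int) ^ n - 1) 9

-- ===== PRECONDITION & SPEC =====
def Spec_sumperms (thing : List Int) (out : Int) : Prop := out = sumperms_alt thing
instance (thing : List Int) (out : Int) : Decidable (Spec_sumperms thing out) := by unfold Spec_sumperms; infer_instance

-- ===== CLAIM (what is proved, stated in full; the proofs are below) =====
def Claim_equal_sumperms : Prop := ∀ (thing : List Int), Dom_sumperms thing → Spec_sumperms thing (sumperms thing)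

-- ===== LEMMAS AND PROOFS =====

def pvCs (l : List Int) : List Nat := (PySem.List.dedup l).map (fun v => l.count v)
def pvCsI (l : List Int) : List Int := (pvCs l).map (fun (c : Nat) => (c : Int))
def pvG (st : List Int × List Int × Int) (p : Int × Int) : List Int × List Int × Int :=
  if p.1 = p.2 then
    (PySem.List.pySetD st.1 (-1) (PySem.List.pyGetD st.1 (-1) 0 + 1), st.2.1, st.2.2)
  else (st.1 ++ [1], st.2.1 ++ [p.2], st.2.2 + 1)
def pvRep (n : Nat) : Int := ((List.range n).map (fun k => (10 : 
Int) ^ k)).sum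

theorem pv_set_last (a : List Int) (h : a ≠ []) (v : Int) :
    a.set (a.length - 1) v = a.dropLast ++ [v] := by
  induction a with
  | nil => simp at h
  | cons x xs ih =>
    cases xs with
    | nil => simp
    | cons y ys =>
      have := ih (by simp)
      simp only [List.length_cons, Nat.add_sub_cancel] at this ⊢
      simp [List.set, this, List.dropLast]

theorem pv_setD_neg_one (a : List Int) (h : a ≠ []) (v : Int) :
    PySem.List.pySetD a (-1) v = a.dropLast ++ [v] := by
  have hl : 0 < a.length := List.length_pos_iff.mpr h
  unfold PySem.List.pySetD PySem.List.pySet? PySem.List.pyIdx?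
  rw [if_neg (by norm_num), if_pos (by omega)]
  simpa using pv_set_last a h v

theorem pv_zip_tail (t : List Int) : t.zip t.tail = t.dropLast.zip t.tail := by
  induction t with
  | nil => simp
  | cons x xs ih =>
    cases xs with
    | nil => simp
    | cons y ys =>
      simp only [List.zip_cons_cons, List.tail_cons, List.dropLast_cons₂] at *
      rw [ih]

theorem pv_dedup_append (l : List Int) (x : Int) :
    PySem.List.dedup (l ++ [x]) =
      if x ∈ l then PySem.List.dedup l else PySem.List.dedup l ++ [x] := by
  simp only [PySem.List.dedup_eq_ofList, PySem.Set.ofList_append_singleton,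
    PySem.Set.add_eq_ite, PySem.Set.mem_ofList]

theorem pv_getLast_concat (u : List Int) (a : Int) (h : u ++ [a] ≠ []) :
    (u ++ [a]).getLast h = a := by
  simpa using List.getLast_concat (l := u) (a := a)

theorem pv_le_last (p : List Int) (hp : p ≠ []) (h : List.Pairwise (· ≤ ·) p) :
    ∀ x ∈ p, x ≤ p.getLast hp := by
  have hu : p = p.dropLast ++ [p.getLast hp] := (List.dropLast_append_getLast hp).symm
  intro x hx
  rw [hu] at hx h
  rcases List.mem_append.mp hx with h1 | h1
  · exact ((List.pairwise_append.mp h).2.2 x h1 _ (by simp))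
  · simp at h1; simp [h1]

theorem pv_step (p : List Int) (hp : p ≠ []) (b : Int)
    (hs : List.Pairwise (· ≤ ·) p) (hb : ∀ x ∈ p, x ≤ b)
    (hl : (PySem.List.dedup p).getLast? = some (p.getLast hp)) :
    pvG (pvCsI p, PySem.List.dedup p, ((PySem.List.dedup p).length : Int)) (p.getLast hp, b)
      = (pvCsI (p ++ [b]), PySem.List.dedup (p ++ [b]),
         ((PySem.List.dedup (p ++ [b])).length : Int)) := by
  have hcount : ∀ v : Int, (p ++ [b]).count v = p.count v + if v = b then 1 else 0 := by
    intro v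
    rw [List.count_append, List.count_singleton]
    congr 1
    by_cases hv : v = b
    · simp [hv]
    · have hv' : ¬ b = v := fun e => hv (Eq.symm e)
      simp [hv, hv']
  by_cases heq : p.getLast hp = b
  · -- repeated value: b ∈ p, last of dedup is b
    have hbp : b ∈ p := heq ▸ List.getLast_mem hp
    obtain ⟨u, hu⟩ := List.getLast?_eq_some_iff.mp hl
    rw [heq] at hu
    have hnd : (PySem.List.dedup p).Nodup := PySem.List.nodup_dedup p
    have hbu : b ∉ u := by
      rw [hu, List.nodup_append] at hnd
      exact fun h => (hnd.2.2 b h b (by simp)) rfl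
    have hded : PySem.List.dedup (p ++ [b]) = PySem.List.dedup p := by
      rw [pv_dedup_append, if_pos hbp]
    unfold pvG
    rw [if_pos heq]
    have hne : pvCsI p ≠ [] := by
      unfold pvCsI pvCs
      rw [hu]
      simp
    have hcs : pvCsI p = u.map (fun v => (p.count v : Int)) ++ [(p.count b : Int)] := by
      unfold pvCsI pvCs
      rw [hu, List.map_map, List.map_append]
      rfl
    rw [hcs, PySem.List.pyGetD_neg_one_append_singleton,
      pv_setD_neg_one _ (by simp), List.dropLast_concat]
    have hcs2 : pvCsI (p ++ [b]) = u.map (fun v => (p.count v : Int)) ++ [(p.count b : Int) + 1] := by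
      unfold pvCsI pvCs
      rw [hded, hu, List.map_map, List.map_append]
      congr 1
      · apply List.map_congr_left
        intro v hv
        have hvb : v ≠ b := fun e => hbu (e ▸ hv)
        simp [Function.comp, hcount, hvb]
      · simp [Function.comp, hcount]
    rw [hcs2, hded]
  · -- new value: b ∉ p
    have hbp : b ∉ p := by
      intro hmem
      exact heq (le_antisymm (hb _ (List.getLast_mem hp)) (pv_le_last p hp hs b hmem))
    have hded : PySem.List.dedup (p ++ [b]) = PySem.List.dedup p ++ [b] := by
      rw [pv_dedup_append, if_neg hbp]
    unfold pvG
    rw [if_neg heq]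
    have hcs2 : pvCsI (p ++ [b]) = pvCsI p ++ [1] := by
      unfold pvCsI pvCs
      rw [hded, List.map_map, List.map_append, List.map_map]
      congr 1
      · apply List.map_congr_left
        intro v hv
        have hvb : v ≠ b := fun e => hbp (e ▸ (PySem.List.mem_dedup p v).mp hv)
        simp [Function.comp, hcount, hvb]
      · simp [Function.comp, hcount, List.count_eq_zero.mpr hbp]
    rw [hcs2, hded]
    simp only [Prod.mk.injEq, List.length_append]
    refine ⟨trivial, trivial, ?_⟩
    push_cast
    simp [add_comm]

theorem pv_last_dedup (p : List Int) (hp : p ≠ []) (b : Int)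
    (hs : List.Pairwise (· ≤ ·) p) (hb : ∀ x ∈ p, x ≤ b)
    (hl : (PySem.List.dedup p).getLast? = some (p.getLast hp)) :
    (PySem.List.dedup (p ++ [b])).getLast? = some b := by
  by_cases hbp : b ∈ p
  · have heq : p.getLast hp = b :=
      le_antisymm (hb _ (List.getLast_mem hp)) (pv_le_last p hp hs b hbp)
    rw [pv_dedup_append, if_pos hbp, hl, heq]
  · rw [pv_dedup_append, if_neg hbp]
    exact List.getLast?_concat

theorem pv_runfold (rest : List Int) : ∀ (p : List Int) (hp : p ≠ []),
    List.Pairwise (· ≤ ·) (p ++ rest) →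
    (PySem.List.dedup p).getLast? = some (p.getLast hp) →
    ((p.getLast hp :: rest).zip rest).foldl pvG
        (pvCsI p, PySem.List.dedup p, ((PySem.List.dedup p).length : Int))
      = (pvCsI (p ++ rest), PySem.List.dedup (p ++ rest),
         ((PySem.List.dedup (p ++ rest)).length : Int)) := by
  induction rest with
  | nil => intro p hp _ _; simp
  | cons b rest ih =>
    intro p hp hsort hl
    have hsp : List.Pairwise (· ≤ ·) p := (List.pairwise_append.mp hsort).1
    have hb : ∀ x ∈ p, x ≤ b := fun x hx =>
      (List.pairwise_append.mp hsort).2.2 x hx b (by simp)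
    rw [List.zip_cons_cons, List.foldl_cons, pv_step p hp b hsp hb hl]
    have hglast : (p ++ [b]).getLast (by simp) = b := pv_getLast_concat p b (by simp)
    have hl' : (PySem.List.dedup (p ++ [b])).getLast? = some ((p ++ [b]).getLast (by simp)) := by
      rw [hglast]
      exact pv_last_dedup p hp b hsp hb hl
    have hsort' : List.Pairwise (· ≤ ·) ((p ++ [b]) ++ rest) := by
      simpa [List.append_assoc] using hsort
    have hrec := ih (p ++ [b]) (by simp) hsort' hl'
    rw [hglast] at hrec
    rw [hrec]
    simp [List.append_assoc]

theorem pv_foldl_two {σ : Type} (xs ys : List Int) (h : ys.length = xs.length)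
    (f : σ → Int → Int → σ) (init : σ) :
    (PySem.List.pyRange 0 (xs.length : Int) 1).foldl
      (fun acc i => f acc (PySem.List.pyGetD xs i 0) (PySem.List.pyGetD ys i 0)) init
      = (xs.zip ys).foldl (fun acc p => f acc p.1 p.2) init := by
  have hlen : (xs.zip ys).length = xs.length := by
    simp [List.length_zip, h]
  have hbody : (PySem.List.pyRange 0 (xs.length : Int) 1).foldl
      (fun acc i => f acc (PySem.List.pyGetD xs i 0) (PySem.List.pyGetD ys i 0)) init
      = (PySem.List.pyRange 0 ((xs.zip ys).length : Int) 1).foldl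
      (fun acc i => (fun (a : σ) (p : Int × Int) => f a p.1 p.2) acc
        (PySem.List.pyGetD (xs.zip ys) i (0, 0))) init := by
    rw [hlen]
    apply PySem.List.foldl_congr_mem
    intro acc i hi
    have hib := PySem.List.mem_pyRange_one.mp hi
    have h0 : 0 ≤ i := hib.1
    have h1x : i < (xs.length : Int) := hib.2
    have h1y : i < (ys.length : Int) := by rw [h]; exact hib.2
    have h1z : i < ((xs.zip ys).length : Int) := by rw [hlen]; exact hib.2
    rw [PySem.List.pyGetD_eq_getElem xs 0 h0 h1x,
        PySem.List.pyGetD_eq_getElem ys 0 h0 h1y,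
        PySem.List.pyGetD_eq_getElem (xs.zip ys) (0, 0) h0 h1z,
        List.getElem_zip]
  rw [hbody, PySem.List.foldl_pyRange_zero_pyGetD' (xs.zip ys) (0, 0)
    (fun (a : σ) (p : Int × Int) => f a p.1 p.2) init]

theorem pv_setD_map_aux (xs : List Int) (f : Int → Int) : ∀ (k : Nat), k ≤ xs.length →
    (PySem.List.pyRange 0 (k : Int) 1).foldl
      (fun a i => PySem.List.pySetD a i (f (PySem.List.pyGetD a i 0))) xs
      = (xs.take k).map f ++ xs.drop k := by
  intro k
  induction k with
  | zero => intro _; simp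
  | succ m ih =>
    intro hk
    have hmlt : m < xs.length := hk
    have hsplit : PySem.List.pyRange 0 ((m + 1 : Nat) : Int) 1
        = PySem.List.pyRange 0 (m : Int) 1 ++ [(m : Int)] := by
      push_cast
      exact PySem.List.pyRange_one_succ_right (by positivity)
    rw [hsplit, List.foldl_append, ih (Nat.le_of_succ_le hk)]
    simp only [List.foldl_cons, List.foldl_nil]
    have hdrop : xs.drop m = xs[m] :: xs.drop (m + 1) := List.drop_eq_getElem_cons hmlt
    rw [hdrop]
    have htm : ((xs.take m).map f).length = m := by
      simp [List.length_take]; omega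
    have hget : PySem.List.pyGetD ((xs.take m).map f ++ xs[m] :: xs.drop (m + 1)) (m : Int) 0
        = xs[m] := by
      rw [PySem.List.pyGetD_natCast, List.getD_eq_getElem?_getD,
          List.getElem?_append_right (by omega), htm, Nat.sub_self]
      simp [List.getElem?_eq_getElem hmlt]
    rw [hget, PySem.List.pySetD_natCast, List.set_append, if_neg (by omega), htm, Nat.sub_self]
    have htake : xs.take (m + 1) = xs.take m ++ [xs[m]] := by
      rw [List.take_succ, List.getElem?_eq_getElem hmlt]
      rfl
    rw [htake]
    simp only [List.set_cons_zero, List.map_append, List.map_cons, List.map_nil,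
      List.append_assoc, List.singleton_append, List.cons_append, List.nil_append]

theorem pv_setD_map (xs : List Int) (f : Int → Int) :
    (PySem.List.pyRange 0 (xs.length : Int) 1).foldl
      (fun a i => PySem.List.pySetD a i (f (PySem.List.pyGetD a i 0))) xs = xs.map f := by
  have := pv_setD_map_aux xs f xs.length (le_refl _)
  simpa using this

theorem pv_gcdfold_nat (cs : List Nat) : ∀ (a : Nat),
    cs.foldl (fun (g : Int) (x : Nat) => ((Int.gcd g (x : Int) : Nat) : Int)) (a : Int)
      = ((cs.foldl Nat.gcd a : Nat) : Int) := by
  induction cs with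
  | nil => intro a; simp
  | cons c cs ih =>
    intro a
    simp only [List.foldl_cons, Int.gcd_natCast_natCast]
    exact ih (Nat.gcd a c)

theorem pv_gcdfold (cs : List Nat) (a : Nat) :
    (cs.map (fun (c : Nat) => (c : Int))).foldl (fun g x => (Int.gcd g x : Int)) (a : Int)
      = ((cs.foldl Nat.gcd a : Nat) : Int) := by
  rw [List.foldl_map]
  exact pv_gcdfold_nat cs a

theorem pv_gcdfold_dvd_init (cs : List Nat) : ∀ (a : Nat), cs.foldl Nat.gcd a ∣ a := by
  induction cs with
  | nil => simp
  | cons x cs ih =>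
    intro a
    exact (ih (Nat.gcd a x)).trans (Nat.gcd_dvd_left a x)

theorem pv_gcdfold_dvd (cs : List Nat) : ∀ (a : Nat), ∀ c ∈ cs, cs.foldl Nat.gcd a ∣ c := by
  induction cs with
  | nil => simp
  | cons x cs ih =>
    intro a c hc
    rcases List.mem_cons.mp hc with h | h
    · subst h
      simp only [List.foldl_cons]
      exact (pv_gcdfold_dvd_init cs (Nat.gcd a c)).trans (Nat.gcd_dvd_right a c)
    · exact ih (Nat.gcd a x) c h

theorem pv_ite_sum {M : Type} [AddCommMonoid M] (x : Int) (k : Int → M) (s : List Int) :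
    ∀ (_ : s.Nodup) (_ : x ∈ s), (s.map (fun v => if v = x then k v else 0)).sum = k x := by
  induction s with
  | nil => simp
  | cons y ys ih =>
    intro h hx
    simp only [List.map_cons, List.sum_cons]
    rcases List.mem_cons.mp hx with rfl | hmem
    · rw [if_pos rfl]
      have hz : (ys.map (fun v => if v = x then k v else 0)).sum = 0 := by
        apply List.sum_eq_zero
        intro z hz
        rcases List.mem_map.mp hz with ⟨v, hv, rfl⟩
        have : v ≠ x := fun e => (List.nodup_cons.mp h).1 (e ▸ hv)
        simp [this]
      rw [hz, add_zero]
    · have hyx : y ≠ x := fun e => (List.nodup_cons.mp h).1 (e ▸ hmem)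
      rw [if_neg hyx, zero_add]
      exact ih (List.nodup_cons.mp h).2 hmem

theorem pv_count_len (t : List Int) : ∀ (s : List Int), s.Nodup → (∀ v ∈ t, v ∈ s) →
    (s.map (fun v => t.count v)).sum = t.length := by
  induction t with
  | nil => intro s _ _; simp
  | cons x t ih =>
    intro s hs hsub
    have hx : x ∈ s := hsub x (by simp)
    have h1 : (s.map (fun v => (x :: t).count v)).sum
        = (s.map (fun v => t.count v)).sum + (s.map (fun v => if v = x then 1 else 0)).sum := by
      rw [← List.sum_map_add]
      apply congrArg
      apply List.map_congr_left
      intro v _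
      by_cases hvx : v = x
      · subst hvx; simp [List.count_cons]
      · have hxv : ¬ x = v := fun e => hvx (Eq.symm e)
        simp [List.count_cons, hvx, hxv]
    rw [h1, pv_ite_sum x (fun _ => 1) s hs hx, ih s hs (fun v hv => hsub v (by simp [hv]))]
    simp

theorem pv_count_sum (t : List Int) : ∀ (s : List Int), s.Nodup → (∀ v ∈ t, v ∈ s) →
    (s.map (fun v => v * (t.count v : Int))).sum = t.sum := by
  induction t with
  | nil => intro s _ _; simp
  | cons x t ih =>
    intro s hs hsub
    have hx : x ∈ s := hsub x (by simp)
    have h1 : (s.map (fun v => v * ((x :: t).count v : Int))).sum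
        = (s.map (fun v => v * (t.count v : Int))).sum
          + (s.map (fun v => if v = x then v else 0)).sum := by
      rw [← List.sum_map_add]
      apply congrArg
      apply List.map_congr_left
      intro v _
      by_cases hvx : v = x
      · subst hvx; simp [List.count_cons]; push_cast; ring
      · have hxv : ¬ x = v := fun e => hvx (Eq.symm e)
        simp [List.count_cons, hvx, hxv]
    rw [h1, pv_ite_sum x (fun v => v) s hs hx, ih s hs (fun v hv => hsub v (by simp [hv]))]
    simp [add_comm]

theorem pv_sumdiv (g : Nat) (cs : List Nat) (h : ∀ c ∈ cs, g ∣ c) :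
    (cs.map (fun c => c / g)).sum = cs.sum / g := by
  induction cs with
  | nil => simp
  | cons c cs ih =>
    have hrest : g ∣ cs.sum := List.dvd_sum (fun x hx => h x (by simp [hx]))
    simp only [List.map_cons, List.sum_cons]
    rw [ih (fun x hx => h x (by simp [hx])), Nat.add_div_of_dvd_left hrest]

theorem pv_prodfac (cs : List Nat) : (cs.map Nat.factorial).prod ∣ Nat.factorial cs.sum := by
  induction cs with
  | nil => simp
  | cons c cs ih =>
    simp only [List.map_cons, List.prod_cons, List.sum_cons]
    exact (mul_dvd_mul_left _ ih).trans (Nat.factorial_mul_factorial_dvd_factorial_add c cs.sum)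

theorem pv_rep_mul (n : Nat) : 9 * pvRep n = 10 ^ n - 1 := by
  induction n with
  | zero => simp [pvRep]
  | succ m ih =>
    unfold pvRep at *
    rw [List.range_succ]
    simp only [List.map_append, List.sum_append, List.map_cons, List.map_nil,
      List.sum_cons, List.sum_nil]
    rw [mul_add, ih]
    ring

theorem pv_rep_floordiv (n : Nat) :
    PySem.Int.floordiv ((10 : Int) ^ n - 1) 9 = pvRep n := by
  rw [← pv_rep_mul n, PySem.Int.floordiv_eq_ediv_of_pos (by norm_num)]
  exact Int.mul_ediv_cancel_left _ (by norm_num)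

theorem pv_facfold (cs : List Nat) : ∀ (K : Nat), (cs.map Nat.factorial).prod ∣ K →
    (cs.map (fun (c : Nat) => (c : Int))).foldl
      (fun p c => PySem.Int.floordiv p (pvFac c)) (K : Int)
      = ((K / (cs.map Nat.factorial).prod : Nat) : Int) := by
  induction cs with
  | nil => intro K _; simp
  | cons c cs ih =>
    intro K hdvd
    simp only [List.map_cons, List.prod_cons] at hdvd ⊢
    rw [List.foldl_cons]
    have hstep : PySem.Int.floordiv (K : Int) (pvFac (c : Int)) = ((K / Nat.factorial c : Nat) : Int) := by
      unfold pvFac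
      rw [Int.toNat_natCast, PySem.Int.floordiv_natCast]
    rw [hstep]
    have hc : Nat.factorial c ∣ K :=
      dvd_trans (Dvd.intro _ rfl) hdvd
    have hrest : (cs.map Nat.factorial).prod ∣ K / Nat.factorial c := by
      rw [Nat.dvd_div_iff_mul_dvd hc]
      exact hdvd
    rw [ih (K / Nat.factorial c) hrest, Nat.div_div_eq_div_mul]

theorem pv_bezout (cs : List Nat) : ∀ (a n P : Nat), ((n : Int) ∣ (a : Int) * (P : Int)) →
    (∀ c ∈ cs, (n : Int) ∣ (c : Int) * (P : Int)) →
    (n : Int) ∣ ((cs.foldl Nat.gcd a : Nat) : Int) * (P : Int) := by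
  induction cs with
  | nil => intro a n P h _; simpa using h
  | cons c cs ih =>
    intro a n P ha hc
    rw [List.foldl_cons]
    apply ih (Nat.gcd a c) n P _ (fun x hx => hc x (by simp [hx]))
    rw [Nat.gcd_eq_gcd_ab]
    have : (↑a * a.gcdA c + ↑c * a.gcdB c) * (P : Int)
        = a.gcdA c * ((a : Int) * P) + a.gcdB c * ((c : Int) * P) := by ring
    rw [this]
    exact dvd_add (Dvd.dvd.mul_left ha _) (Dvd.dvd.mul_left (hc c (by simp)) _)

theorem pv_core (cs : List Nat) (c : Nat) (hc : c ∈ cs) (h1 : 1 ≤ c) :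
    cs.sum ∣ c * (Nat.factorial cs.sum / (cs.map Nat.factorial).prod) := by
  obtain ⟨l1, l2, rfl⟩ := List.append_of_mem hc
  set rest := l1 ++ l2 with hrest
  have hsum : (l1 ++ c :: l2).sum = c + rest.sum := by simp [hrest]; ring
  have hprod : ((l1 ++ c :: l2).map Nat.factorial).prod = Nat.factorial c * (rest.map Nat.factorial).prod := by
    simp [hrest]; ring
  set n := (l1 ++ c :: l2).sum with hn
  set F := ((l1 ++ c :: l2).map Nat.factorial).prod with hF
  set K := (rest.map Nat.factorial).prod with hK
  -- P := the multinomial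
  have hFdvd : F ∣ Nat.factorial n := pv_prodfac _
  set P := Nat.factorial n / F with hP
  have hPF : P * F = Nat.factorial n := Nat.div_mul_cancel hFdvd
  -- m := multinomial with c decremented
  have hn1 : n - 1 = (c - 1) + rest.sum := by omega
  have hMdvd : Nat.factorial (c - 1) * K ∣ Nat.factorial (n - 1) := by
    rw [hn1]
    have := pv_prodfac ((c-1) :: rest)
    simpa [hK] using this
  set m := Nat.factorial (n - 1) / (Nat.factorial (c - 1) * K) with hm
  have hmK : m * (Nat.factorial (c - 1) * K) = Nat.factorial (n - 1) := Nat.div_mul_cancel hMdvd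
  have hnpos : 1 ≤ n := by
    have : c ≤ n := by rw [hn]; simp [hsum]; omega
    omega
  have hfc : Nat.factorial c = c * Nat.factorial (c - 1) := by
    have : c = (c - 1) + 1 := by omega
    rw [this, Nat.factorial_succ]
    congr 1 <;> omega
  have key : c * P * (Nat.factorial (c - 1) * K) = n * m * (Nat.factorial (c - 1) * K) := by
    have h10 : c * P * (Nat.factorial (c - 1) * K) = P * (Nat.factorial c * K) := by
      rw [hfc]; ring
    rw [h10, ← hprod, hPF]
    have h11 : Nat.factorial n = n * Nat.factorial (n - 1) := by
      have : n = (n - 1) + 1 := by omega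
      rw [this, Nat.factorial_succ]
      congr 1 <;> omega
    rw [h11, ← hmK]
    ring
  have hpos : 0 < Nat.factorial (c - 1) * K := by
    apply Nat.mul_pos (Nat.factorial_pos _)
    apply List.prod_pos
    intro x hx
    rcases List.mem_map.mp hx with ⟨y, _, rfl⟩
    exact Nat.factorial_pos y
  have : c * P = n * m := Nat.eq_of_mul_eq_mul_right hpos key
  exact Dvd.intro m (by rw [this])

theorem pv_cast_sum (cs : List Nat) :
    ((cs.map (fun (c : Nat) => (c : Int))).sum) = (cs.sum : Int) := by
  induction cs with
  | nil => simp
  | cons c cs ih =>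
    rw [List.map_cons, List.sum_cons, ih, List.sum_cons, Nat.cast_add]

theorem pvFac_natCast (m : Nat) : pvFac ((m : Nat) : Int) = (Nat.factorial m : Int) := by
  unfold pvFac
  rw [Int.toNat_natCast]

theorem pv_rv (n : Nat) (c : Int) :
    (PySem.List.pyRange 0 (n : Int) 1).foldl (fun rv i => rv + c * (10 : Int) ^ i.toNat) 0
      = c * pvRep n := by
  rw [PySem.List.foldl_add (PySem.List.pyRange 0 (n : Int) 1) (fun i => c * (10 : Int) ^ i.toNat) 0]
  rw [PySem.List.pyRange_one, List.map_map]
  unfold pvRep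
  rw [← List.sum_map_mul_left]
  rw [zero_add]
  apply congrArg
  apply List.map_congr_left
  intro k hk
  simp

theorem pv_alt_eval (l : List Int) (h : l ≠ []) :
    sumperms_alt l =
      PySem.Int.floordiv
        (((Nat.factorial l.length / ((pvCs l).map Nat.factorial).prod : Nat) : Int) * l.sum)
        (l.length : Int) * pvRep l.length := by
  unfold sumperms_alt
  rw [if_neg (by simpa using h)]
  have hv : (PySem.Dict.counter l).values = (pvCs l).map (fun (c : Nat) => (c : Int)) := by
    show ((PySem.Dict.counter l).items.map (·.2)) = _
    rw [PySem.Dict.items_counter, List.map_map]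
    unfold pvCs
    rw [PySem.List.dedup_eq_ofList, List.map_map]
    rfl
  rw [hv]
  have hsum : (pvCs l).sum = l.length :=
    pv_count_len l (PySem.List.dedup l) (PySem.List.nodup_dedup l)
      (fun v hv => (PySem.List.mem_dedup l v).mpr hv)
  rw [show pvFac ((l.length : Nat) : Int) = ((Nat.factorial l.length : Nat) : Int) from pvFac_natCast _]
  rw [pv_facfold (pvCs l) (Nat.factorial l.length) (by rw [← hsum]; exact pv_prodfac _)]
  rw [pv_rep_floordiv]

theorem pv_stage1 (t : List Int) (hne : t ≠ []) (hs : List.Pairwise (· ≤ ·) t) :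
    (PySem.List.pyRange 0 ((t.length : Int) - 1) 1).foldl
      (fun (st : List Int × List Int × Int) i =>
        if PySem.List.pyGetD t i 0 = PySem.List.pyGetD t (i + 1) 0 then
          (PySem.List.pySetD st.1 (-1) (PySem.List.pyGetD st.1 (-1) 0 + 1), st.2.1, st.2.2)
        else
          (st.1 ++ [1], st.2.1 ++ [PySem.List.pyGetD t (i + 1) 0], st.2.2 + 1))
      ([1], [PySem.List.pyGetD t 0 0], 1)
      = (pvCsI t, PySem.List.dedup t, ((PySem.List.dedup t).length : Int)) := by
  have hpos := List.length_pos_iff.mpr hne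
  have hlen : (t.length : Int) - 1 = ((t.dropLast.length : Nat) : Int) := by
    rw [List.length_dropLast]
    omega
  rw [hlen]
  have hcongr := PySem.List.foldl_congr_mem
    (PySem.List.pyRange 0 ((t.dropLast.length : Nat) : Int) 1)
    (fun (st : List Int × List Int × Int) i =>
        if PySem.List.pyGetD t i 0 = PySem.List.pyGetD t (i + 1) 0 then
          (PySem.List.pySetD st.1 (-1) (PySem.List.pyGetD st.1 (-1) 0 + 1), st.2.1, st.2.2)
        else
          (st.1 ++ [1], st.2.1 ++ [PySem.List.pyGetD t (i + 1) 0], st.2.2 + 1))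
    (fun acc i => (fun (a : List Int × List Int × Int) (x y : Int) => pvG a (x, y)) acc
        (PySem.List.pyGetD t.dropLast i 0) (PySem.List.pyGetD t.tail i 0))
    ([1], [PySem.List.pyGetD t 0 0], 1)
    (by
      intro acc i hi
      rcases PySem.List.mem_pyRange_one.mp hi with ⟨hi0, hi1⟩
      have hiN : i.toNat < t.dropLast.length := by
        have := Int.toNat_of_nonneg hi0
        omega
      have hlt : t.dropLast.length < t.length := by
        rw [List.length_dropLast]
        have := List.length_pos_iff.mpr hne
        omega
      have hxread : PySem.List.pyGetD t.dropLast i 0 = PySem.List.pyGetD t i 0 := by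
        rw [PySem.List.pyGetD_eq_getElem _ 0 hi0 (by exact_mod_cast hi1),
            PySem.List.pyGetD_eq_getElem _ 0 hi0 (by push_cast; omega)]
        exact List.getElem_dropLast _
      have hyread : PySem.List.pyGetD t.tail i 0 = PySem.List.pyGetD t (i + 1) 0 := by
        have htl : i < (t.tail.length : Int) := by
          simp only [List.length_tail]
          push_cast
          omega
        rw [PySem.List.pyGetD_eq_getElem _ 0 hi0 htl,
            PySem.List.pyGetD_eq_getElem _ 0 (by omega) (by push_cast; omega)]
        have hidx : (i + 1).toNat = i.toNat + 1 := by omega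
        simp only [hidx]
        exact List.getElem_tail _
      simp only [pvG]
      rw [hxread, hyread])
  rw [hcongr]
  rw [pv_foldl_two t.dropLast t.tail (by simp [List.length_dropLast, List.length_tail])
    (fun (a : List Int × List Int × Int) (x y : Int) => pvG a (x, y))
    ([1], [PySem.List.pyGetD t 0 0], 1)]
  rw [show (fun (acc : List Int × List Int × Int) (p : Int × Int) =>
      (fun (a : List Int × List Int × Int) (x y : Int) => pvG a (x, y)) acc p.1 p.2) = pvG from rfl]
  rw [← pv_zip_tail]
  obtain ⟨x, xt, rfl⟩ : ∃ x xt, t = x :: xt := by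
    cases t with
    | nil => exact absurd rfl hne
    | cons a b => exact ⟨a, b, rfl⟩
  rw [PySem.List.pyGetD_zero_cons]
  have hinit : (([1], [x], 1) : List Int × List Int × Int)
      = (pvCsI [x], PySem.List.dedup [x], ((PySem.List.dedup [x]).length : Int)) := by
    have hd : PySem.List.dedup [x] = [x] := rfl
    have hc : pvCsI [x] = [1] := by
      unfold pvCsI pvCs
      rw [hd]
      simp
    rw [hd, hc]
    simp
  rw [show ((x :: xt).zip (x :: xt).tail) = (([x].getLast (List.cons_ne_nil x []) :: xt).zip xt) from rfl]
  rw [hinit]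
  rw [pv_runfold xt [x] (by simp) (by simpa using hs)
    (by rw [show PySem.List.dedup [x] = [x] from rfl]; simp)]
  simp

theorem pv_zip_map (l : List Int) (h : Int → Int) :
    l.zip (l.map h) = l.map (fun v => (v, h v)) := by
  induction l with
  | nil => simp
  | cons x xs ih => simp [ih]

theorem pv_main (thing : List Int) : sumperms thing = sumperms_alt thing := by
  by_cases h0 : thing.length = 0
  · rw [List.length_eq_zero_iff] at h0
    subst h0
    rfl
  by_cases h1 : thing.length = 1
  · obtain ⟨x, rfl⟩ := List.length_eq_one_iff.mp h1
    rw [pv_alt_eval [x] (by simp)]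
    simp only [List.length_singleton]
    rw [show pvCs [x] = [1] from by
      unfold pvCs
      rw [show PySem.List.dedup [x] = [x] from rfl]
      simp]
    rw [show ((Nat.factorial 1 / ([1].map Nat.factorial).prod : Nat) : Int) = 1 from by decide]
    rw [show pvRep 1 = 1 from by decide]
    rw [one_mul, mul_one, Nat.cast_one]
    rw [PySem.Int.floordiv_eq_ediv_of_pos (by norm_num), Int.ediv_one]
    unfold sumperms
    rw [if_neg h0, if_pos h1]
    rw [PySem.List.pyGetD_zero_cons]
    simp
  -- main case: length ≥ 2
  have h2 : 2 ≤ thing.length := by omega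
  set t := PySem.List.sorted thing (fun x => x) false with ht
  have hperm : t.Perm thing := PySem.List.sorted_perm thing _ false
  have hlen : t.length = thing.length := hperm.length_eq
  have htne : t ≠ [] := by
    intro e
    rw [e] at hlen
    simp at hlen
    omega
  have hs : List.Pairwise (· ≤ ·) t := PySem.List.sorted_pairwise thing (fun x => x)
  have hD : PySem.List.dedup t ≠ [] := by
    obtain ⟨y, hy⟩ := List.exists_mem_of_ne_nil t htne
    exact List.ne_nil_of_mem ((PySem.List.mem_dedup t y).mpr hy)
  have hsum : (pvCs t).sum = t.length := by
    unfold pvCs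
    exact pv_count_len t (PySem.List.dedup t) (PySem.List.nodup_dedup t)
      (fun v hv => (PySem.List.mem_dedup t v).mpr hv)
  have hone : ∀ c ∈ pvCs t, 1 ≤ c := by
    unfold pvCs
    intro c hc
    rcases List.mem_map.mp hc with ⟨v, hv, rfl⟩
    exact List.count_pos_iff.mpr ((PySem.List.mem_dedup t v).mp hv)
  set g := (pvCs t).foldl Nat.gcd 0 with hgdef
  have hgdvd : ∀ c ∈ pvCs t, g ∣ c := pv_gcdfold_dvd (pvCs t) 0
  have hgpos : 0 < g := by
    obtain ⟨y, hy⟩ := List.exists_mem_of_ne_nil t htne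
    have hyc : t.count y ∈ pvCs t := by
      unfold pvCs
      exact List.mem_map_of_mem ((PySem.List.mem_dedup t y).mpr hy)
    rcases Nat.eq_zero_or_pos g with hz | hp
    · have := hgdvd _ hyc
      rw [hz] at this
      have := Nat.eq_zero_of_zero_dvd this
      have hcp := List.count_pos_iff.mpr hy
      omega
    · exact hp
  have hgn : g ∣ t.length := by
    rw [← hsum]
    exact List.dvd_sum hgdvd
  set P := Nat.factorial t.length / ((pvCs t).map Nat.factorial).prod with hPdef
  have hdvdfac : ((pvCs t).map Nat.factorial).prod ∣ Nat.factorial t.length := by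
    rw [← hsum]
    exact pv_prodfac _
  have hcore : ∀ c ∈ pvCs t, ((t.length : Nat) : Int) ∣ ((c : Nat) : Int) * ((P : Nat) : Int) := by
    intro c hc
    have := pv_core (pvCs t) c hc (hone c hc)
    rw [hsum] at this
    have : (t.length : Nat) ∣ c * P := this
    exact_mod_cast Int.natCast_dvd_natCast.mpr this
  have hbez : (t.length : Nat) ∣ g * P := by
    have := pv_bezout (pvCs t) 0 t.length P (by simp) hcore
    rw [← hgdef] at this
    exact_mod_cast this
  have hn2P : (t.length / g) ∣ P := by
    have he2 : g * (t.length / g) = t.length := Nat.mul_div_cancel' hgn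
    rw [← he2] at hbez
    exact (Nat.mul_dvd_mul_iff_left hgpos).mp hbez
  set P2 := P / (t.length / g) with hP2def
  -- A side
  unfold sumperms
  rw [if_neg h0, if_neg h1]
  simp only []
  rw [← ht]
  rw [pv_stage1 t htne hs]
  dsimp only
  rw [show pvCsI t = (pvCs t).map (fun (c : Nat) => (c : Int)) from rfl]
  rw [pv_cast_sum (pvCs t), hsum, pvFac_natCast]
  rw [PySem.List.foldl_pyRange_zero_pyGetD' ((pvCs t).map (fun (c : Nat) => (c : Int))) 0
    (fun p c => PySem.Int.floordiv p (pvFac c)) ((Nat.factorial t.length : Nat) : Int)]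
  rw [pv_facfold (pvCs t) (Nat.factorial t.length) hdvdfac]
  rw [show ((pvCs t).map (fun (c : Nat) => (c : Int))).foldl
      (fun g x => (Int.gcd g x : Int)) (0 : Int) = ((g : Nat) : Int) from pv_gcdfold (pvCs t) 0]
  rw [pv_setD_map ((pvCs t).map (fun (c : Nat) => (c : Int)))
    (fun x => PySem.Int.floordiv x ((g : Nat) : Int))]
  rw [show ((pvCs t).map (fun (c : Nat) => (c : Int))).map
        (fun x => PySem.Int.floordiv x ((g : Nat) : Int))
      = ((pvCs t).map (fun c => c / g)).map (fun (c : Nat) => (c : Int)) from by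
    rw [List.map_map, List.map_map]
    apply List.map_congr_left
    intro c _
    simp only [Function.comp]
    exact PySem.Int.floordiv_natCast c g]
  rw [pv_cast_sum ((pvCs t).map (fun c => c / g))]
  rw [show ((pvCs t).map (fun c => c / g)).sum = t.length / g from by
    rw [pv_sumdiv g _ hgdvd, hsum]]
  rw [show PySem.Int.floordiv ((P : Nat) : Int) ((t.length / g : Nat) : Int)
      = ((P2 : Nat) : Int) from PySem.Int.floordiv_natCast P (t.length / g)]
  rw [pv_setD_map (((pvCs t).map (fun c => c / g)).map (fun (c : Nat) => (c : Int)))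
    (fun x => x * ((P2 : Nat) : Int))]
  rw [show (((pvCs t).map (fun c => c / g)).map (fun (c : Nat) => (c : Int))).map
        (fun x => x * ((P2 : Nat) : Int))
      = (PySem.List.dedup t).map
          (fun v => ((t.count v / g : Nat) : Int) * ((P2 : Nat) : Int)) from by
    unfold pvCs
    rw [List.map_map, List.map_map, List.map_map]
    rfl]
  rw [pv_foldl_two (PySem.List.dedup t)
    ((PySem.List.dedup t).map (fun v => ((t.count v / g : Nat) : Int) * ((P2 : Nat) : Int)))
    (by rw [List.length_map]) (fun od a b => od + a * b) 0]
  rw [pv_zip_map (PySem.List.dedup t)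
    (fun v => ((t.count v / g : Nat) : Int) * ((P2 : Nat) : Int))]
  rw [List.foldl_map]
  rw [PySem.List.foldl_add (PySem.List.dedup t)
    (fun (v : Int) => v * (((t.count v / g : Nat) : Int) * ((P2 : Nat) : Int))) 0]
  rw [zero_add, pv_rv t.length]
  -- B side
  rw [pv_alt_eval thing (List.length_pos_iff.mp (by omega))]
  have hpermD : (PySem.List.dedup thing).Perm (PySem.List.dedup t) := by
    rw [List.perm_ext_iff_of_nodup (PySem.List.nodup_dedup _) (PySem.List.nodup_dedup _)]
    intro a
    rw [PySem.List.mem_dedup, PySem.List.mem_dedup]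
    exact (hperm.mem_iff).symm
  have hcnt : ∀ v, thing.count v = t.count v := fun v => (hperm.count_eq v).symm
  have hcsperm : (pvCs thing).Perm (pvCs t) := by
    unfold pvCs
    rw [List.map_congr_left (fun v (_ : v ∈ PySem.List.dedup thing) => hcnt v)]
    exact hpermD.map _
  rw [show ((pvCs thing).map Nat.factorial).prod = ((pvCs t).map Nat.factorial).prod from
    (hcsperm.map _).prod_eq]
  rw [show thing.sum = t.sum from hperm.sum_eq.symm]
  rw [← hlen, ← hPdef]
  rw [show t.sum = ((PySem.List.dedup t).map (fun v => v * (t.count v : Int))).sum from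
    (pv_count_sum t (PySem.List.dedup t) (PySem.List.nodup_dedup t)
      (fun v hv => (PySem.List.mem_dedup t v).mpr hv)).symm]
  have hkey : ((P : Nat) : Int) * ((PySem.List.dedup t).map (fun v => v * (t.count v : Int))).sum
      = ((t.length : Nat) : Int) *
        ((PySem.List.dedup t).map
          (fun (v : Int) => v * (((t.count v / g : Nat) : Int) * ((P2 : Nat) : Int)))).sum := by
    rw [← List.sum_map_mul_left, ← List.sum_map_mul_left]
    apply congrArg
    apply List.map_congr_left
    intro v hv
    have hgc : g ∣ t.count v := by
      apply hgdvd
      unfold pvCs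
      exact List.mem_map_of_mem hv
    have e1 : ((t.count v : Nat) : Int) = ((g : Nat) : Int) * ((t.count v / g : Nat) : Int) := by
      exact_mod_cast congrArg (fun (m : Nat) => (m : Int)) (Nat.mul_div_cancel' hgc).symm
    have e2 : ((t.length : Nat) : Int) = ((g : Nat) : Int) * ((t.length / g : Nat) : Int) := by
      exact_mod_cast congrArg (fun (m : Nat) => (m : Int)) (Nat.mul_div_cancel' hgn).symm
    have e3 : ((P : Nat) : Int) = ((t.length / g : Nat) : Int) * ((P2 : Nat) : Int) := by
      exact_mod_cast congrArg (fun (m : Nat) => (m : Int)) (Nat.mul_div_cancel' hn2P).symm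
    rw [e1, e2, e3]
    ring
  rw [hkey]
  rw [PySem.Int.floordiv_eq_ediv_of_pos (by exact_mod_cast (by omega : 0 < t.length))]
  rw [Int.mul_ediv_cancel_left _ (by exact_mod_cast (by omega : t.length ≠ 0))]

-- ===== VERDICT (by name: the statement is the Claim_ definition above) =====
theorem sumperms_spec : Claim_equal_sumperms := by
  intro thing _
  unfold Spec_sumperms
  exact pv_main thing
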